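-- pv_equiv track=rewrite | github.com/zhihanxu/DSA_training | company/meta/oa/n1p3.py | count_one_digit_diff_pairs
-- ===== SOURCE A (Python) =====
-- def count_one_digit_diff_pairs(codes):
--     # Convert all numbers to strings
--     str_codes = [str(c) for c in codes]
--
--     # Group by length (no defaultdict)
--     groups = {}
--     for s in str_codes:
--         l = len(s)
--         if l not in groups:
--             groups[l] = []
--         groups[l].append(s)
--
--     # Helper: check if two codes differ by exactly one digit
--     def differ_by_one(a, b):
--         diff = 0
--         for x, y in zip(a, b):
--             if x != y:
--                 diff += 1
--                 if diff > 1: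
--                     return False
--         return diff == 1
--
--     # Count valid pairs
--     count = 0
--     for same_len_codes in groups.values():
--         n = len(same_len_codes)
--         for i in range(n):
--             for j in range(i + 1, n):
--                 if differ_by_one(same_len_codes[i], same_len_codes[j]):
--                     count += 1
--     return count
-- ===== SOURCE B (Python) =====
-- def count_one_digit_diff_pairs(codes):
--     # One pass: count pairs sharing a "masked" key (one position wildcarded),
--     # then subtract the over-count coming from fully identical strings.
--     masked = {}
--     full = {}
--     for c in codes:
--         s = str(c)
--         full[s] = full.get(s, 0) + 1
--         for i in range(len(s)):
--             k = (i, s[:i], s[i + 1:])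
--             masked[k] = masked.get(k, 0) + 1
--     total = 0
--     for v in masked.values():
--         total += v * (v - 1) // 2
--     for s, v in full.items():
--         total -= len(s) * (v * (v - 1) // 2)
--     return total
-- ===== Notes on version B (the rewrite author's own statement) =====
-- stated objective: faster
-- what changed: B replaces A's group-by-length plus quadratic all-pairs scan with a single pass that counts, in a hash map, pairs of codes sharing a position-masked key (prefix, suffix) and subtracts the over-count contributed by fully identical code strings.
import Mathlib
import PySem

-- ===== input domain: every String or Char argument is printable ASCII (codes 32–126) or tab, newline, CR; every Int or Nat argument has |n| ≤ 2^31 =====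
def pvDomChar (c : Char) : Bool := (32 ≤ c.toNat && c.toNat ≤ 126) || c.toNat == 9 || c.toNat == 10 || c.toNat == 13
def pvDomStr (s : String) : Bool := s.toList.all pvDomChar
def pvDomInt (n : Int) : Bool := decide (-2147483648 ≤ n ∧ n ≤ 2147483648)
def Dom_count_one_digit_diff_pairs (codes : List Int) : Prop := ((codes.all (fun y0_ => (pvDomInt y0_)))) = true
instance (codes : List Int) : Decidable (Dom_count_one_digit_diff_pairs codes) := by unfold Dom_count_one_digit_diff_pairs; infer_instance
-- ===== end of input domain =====

-- B replaces A's per-length-group quadratic pair scan by a single pass that counts pairs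
-- sharing a position-masked key in a hash map (objective: faster).

-- ===== PORT A =====
-- helper differ_by_one: loop over zip(a, b) with the early 'return False'
def pvDifferLoop : List (Char × Char) → Int → Bool
  | [], diff => diff == 1
  | (x, y) :: rest, diff =>
      if x ≠ y then
        if diff + 1 > 1 then false else pvDifferLoop rest (diff + 1)
      else pvDifferLoop rest diff

def pvDifferByOne (a b : String) : Bool := pvDifferLoop (a.toList.zip b.toList) 0

-- the grouping loop: 'if l not in groups: groups[l] = []' then 'groups[l].append(s)'
def pvGroups (strCodes : List String) : PySem.Dict Int (List String) :=
  strCodes.foldl (fun groups s =>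
    let l : Int := PySem.Str.len s
    let groups := if groups.contains l then groups else groups.insert l []
    groups.insert l (groups.getD l [] ++ [s])) PySem.Dict.empty

def count_one_digit_diff_pairs (codes : List Int) : Int :=
  let strCodes := codes.map (fun c => PySem.Int.toStr c)
  let groups := pvGroups strCodes
  groups.values.foldl (fun count g =>
    let n : Int := (g.length : Int)
    (PySem.List.pyRange 0 n 1).foldl (fun count i =>
      (PySem.List.pyRange (i + 1) n 1).foldl (fun count j =>
        if pvDifferByOne (PySem.List.pyGetD g i "") (PySem.List.pyGetD g j "") then count + 1
        else count) count) count) 0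

-- ===== PORT B =====
def count_one_digit_diff_pairs_alt (codes : List Int) : Int :=
  let st := codes.foldl
    (fun (st : PySem.Dict (Int × String × String) Int × PySem.Dict String Int) c =>
      let s := PySem.Int.toStr c
      let full := st.2.insert s (st.2.getD s 0 + 1)
      let masked := (PySem.List.pyRange 0 (PySem.Str.len s) 1).foldl
        (fun masked i =>
          let k := (i, PySem.Str.slice s none (some i), PySem.Str.slice s (some (i + 1)) none)
          masked.insert k (masked.getD k 0 + 1)) st.1
      (masked, full))
    (PySem.Dict.empty, PySem.Dict.empty)
  let total := st.1.values.foldl (fun total v => total + PySem.Int.floordiv (v * (v - 1)) 2) 0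
  st.2.items.foldl
    (fun total p => total - PySem.Str.len p.1 * PySem.Int.floordiv (p.2 * (p.2 - 1)) 2) total

-- ===== PRECONDITION & SPEC =====
def Spec_count_one_digit_diff_pairs (codes : List Int) (out : Int) : Prop := out = count_one_digit_diff_pairs_alt codes
instance (codes : List Int) (out : Int) : Decidable (Spec_count_one_digit_diff_pairs codes out) := by unfold Spec_count_one_digit_diff_pairs; infer_instance

-- ===== CLAIM (what is proved, stated in full; the proofs are below) =====
def Claim_equal_count_one_digit_diff_pairs : Prop := ∀ (codes : List Int), Dom_count_one_digit_diff_pairs codes → Spec_count_one_digit_diff_pairs codes (count_one_digit_diff_pairs codes)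

-- ===== LEMMAS AND PROOFS =====

-- pair sum: Σ_{i<j} f l[i] l[j], the common mathematical value of both programs
def pvPS {α : Type} (f : α → α → Int) : List α → Int
  | [] => 0
  | x :: xs => (xs.map (f x)).sum + pvPS f xs

-- C(n, 2) over Nat, as an Int
def pvC2 (n : Nat) : Int := ((n * (n - 1) / 2 : Nat) : Int)

-- number of mismatching positions of zip(a, b)
def pvMism (A B : List Char) : Nat := (A.zip B).countP (fun p => p.1 != p.2)

-- the pair predicate both programs count: same length and exactly one differing position
def pvQ (a b : String) : Int :=
  if a.toList.length = b.toList.length ∧ pvMism a.toList b.toList = 1 then 1 else 0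

-- number of positions of a at which the masked keys of a and b agree
def pvM : List Char → List Char → Int
  | [], _ => 0
  | _ :: _, [] => 0
  | x :: A, y :: B => (if A = B then 1 else 0) + (if x = y then pvM A B else 0)

-- the masked keys of one string
def pvKeys (s : String) : List (Int × String × String) :=
  (PySem.List.pyRange 0 (PySem.Str.len s) 1).map
    (fun i => (i, PySem.Str.slice s none (some i), PySem.Str.slice s (some (i + 1)) none))

def pvD (a b : String) : Int := if pvDifferByOne a b then 1 else 0

-- ---------- generic sum and pair-sum lemmas ----------

theorem pvSum_map_sub {α : Type} (l : List α) (f g : α → Int) :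
    (l.map (fun x => f x - g x)).sum = (l.map f).sum - (l.map g).sum := by
  induction l with
  | nil => simp
  | cons x xs ih => simp [ih]; ring

theorem pvSum_flatMap {α : Type} (l : List α) (g : α → List Int) :
    (l.flatMap g).sum = (l.map (fun a => (g a).sum)).sum := by
  induction l with
  | nil => simp
  | cons x xs ih => simp [List.flatMap_cons, ih]

theorem pvSum_swap {α β : Type} (l : List α) (m : List β) (h : α → β → Int) :
    (l.map (fun a => (m.map (h a)).sum)).sum = (m.map (fun b => (l.map (fun a => h a b)).sum)).sum := by
  induction l with
  | nil => simp
  | cons x xs ih => simp [ih, ← List.sum_map_add]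

theorem pvRangeSum_eq_pvPS (g : List String) :
    ((List.range g.length).map (fun k =>
      ((g.drop (k + 1)).countP (fun t => pvDifferByOne (g.getD k "") t) : Int))).sum
      = pvPS pvD g := by
  induction g with
  | nil => simp [pvPS]
  | cons x xs ih =>
    rw [List.length_cons, List.range_succ_eq_map]
    simp only [List.map_cons, List.sum_cons, List.map_map]
    have h0 : ((x :: xs).drop 1).countP (fun t => pvDifferByOne ((x :: xs).getD 0 "") t)
        = xs.countP (fun t => pvDifferByOne x t) := by simp
    have hsh : (List.map ((fun k => ((List.drop (k + 1) (x :: xs)).countP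
          (fun t => pvDifferByOne ((x :: xs).getD k "") t) : Int)) ∘ Nat.succ) (List.range xs.length))
        = (List.map (fun k => ((List.drop (k + 1) xs).countP
          (fun t => pvDifferByOne (xs.getD k "") t) : Int)) (List.range xs.length)) := by
      apply List.map_congr_left
      intro k hk
      simp [List.drop_succ_cons, List.getD_cons_succ]
    rw [h0, hsh, ih]
    simp only [pvPS]
    congr 1
    rw [← PySem.List.sum_map_ite_one_zero]
    rfl

theorem pvSum_map_update {α : Type} (ks : List α) (f f' : α → Int) (x0 : α)
    (hnd : ks.Nodup) (hx : x0 ∈ ks) (hagree : ∀ k ∈ ks, k ≠ x0 → f' k = f k) :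
    (ks.map f').sum = (ks.map f).sum + (f' x0 - f x0) := by
  induction ks with
  | nil => cases hx
  | cons k t ih =>
    rcases List.mem_cons.mp hx with h | h
    · subst h
      have : ∀ j ∈ t, f' j = f j := by
        intro j hj
        exact hagree j (List.mem_cons_of_mem _ hj) (fun hej => (List.nodup_cons.mp hnd).1 (hej ▸ hj))
      simp only [List.map_cons, List.sum_cons]
      rw [List.map_congr_left this]
      ring
    · have hk : k ≠ x0 := fun he => (List.nodup_cons.mp hnd).1 (he ▸ h)
      simp only [List.map_cons, List.sum_cons]
      rw [hagree k (List.mem_cons_self) hk,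
        ih (List.nodup_cons.mp hnd).2 h (fun j hj hje => hagree j (List.mem_cons_of_mem _ hj) hje)]
      ring

theorem pvSum_map_filter {α : Type} (l : List α) (p : α → Bool) (f : α → Int) :
    ((l.filter p).map f).sum = (l.map (fun y => if p y then f y else 0)).sum := by
  induction l with
  | nil => rfl
  | cons x t ih =>
    by_cases h : p x <;> simp [List.filter_cons, h, ih]


theorem pvPS_congr {α : Type} {f g : α → α → Int} (l : List α)
    (h : ∀ a b, f a b = g a b) : pvPS f l = pvPS g l := by
  induction l with
  | nil => rfl
  | cons x xs ih => simp only [pvPS, ih]; congr 1; exact congrArg _ (List.map_congr_left (fun b _ => h x b))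

theorem pvPS_append_singleton {α : Type} (f : α → α → Int) (xs : List α) (x : α) :
    pvPS f (xs ++ [x]) = pvPS f xs + (xs.map (fun a => f a x)).sum := by
  induction xs with
  | nil => simp [pvPS]
  | cons y ys ih => simp [pvPS, ih]; ring

theorem pvPS_append {α : Type} (f : α → α → Int) (ys zs : List α) :
    pvPS f (ys ++ zs) = pvPS f ys + (ys.map (fun y => (zs.map (f y)).sum)).sum + pvPS f zs := by
  induction ys with
  | nil => simp [pvPS]
  | cons y t ih => simp [pvPS, ih]; ring

theorem pvPS_sub {α : Type} (f g : α → α → Int) (l : List α) :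
    pvPS (fun a b => f a b - g a b) l = pvPS f l - pvPS g l := by
  induction l with
  | nil => rfl
  | cons x xs ih => simp [pvPS, ih, pvSum_map_sub]; ring

theorem pvPS_flatMap {α β : Type} (f : β → β → Int) (K : α → List β) (l : List α) :
    pvPS f (l.flatMap K) = (l.map (fun s => pvPS f (K s))).sum +
      pvPS (fun a b => ((K a).map (fun x => ((K b).map (f x)).sum)).sum) l := by
  induction l with
  | nil => simp [pvPS]
  | cons s t ih =>
    rw [List.flatMap_cons, pvPS_append, ih]
    simp only [pvPS, List.map_cons, List.sum_cons]
    have : (List.map (fun y => (List.map (f y) (List.flatMap K t)).sum) (K s)).sum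
        = (List.map (fun b => (List.map (fun x => (List.map (f x) (K b)).sum) (K s)).sum) t).sum := by
      have h1 : ∀ y, (List.map (f y) (List.flatMap K t)).sum
          = (t.map (fun b => ((K b).map (f y)).sum)).sum := by
        intro y
        rw [List.map_flatMap, pvSum_flatMap]
      calc (List.map (fun y => (List.map (f y) (List.flatMap K t)).sum) (K s)).sum
          = ((K s).map (fun y => (t.map (fun b => ((K b).map (f y)).sum)).sum)).sum := by
            exact congrArg _ (List.map_congr_left (fun y _ => h1 y))
        _ = _ := by
            rw [pvSum_swap]
    rw [this]; ring

theorem pvPS_eq_ind_zero_of_nodup {α : Type} [BEq α] [LawfulBEq α] (l : List α) (h : l.Nodup) :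
    pvPS (fun a b => if a == b then (1 : Int) else 0) l = 0 := by
  induction l with
  | nil => rfl
  | cons x xs ih =>
    simp only [pvPS, ih (List.nodup_cons.mp h).2, add_zero]
    have hx : x ∉ xs := (List.nodup_cons.mp h).1
    have : ∀ b ∈ xs, (if x == b then (1:Int) else 0) = 0 := by
      intro b hb
      have : x ≠ b := fun he => hx (he ▸ hb)
      simp [beq_eq_false_iff_ne.mpr this]
    rw [List.map_congr_left this]; simp


-- ---------- A-side ----------

theorem pvDifferLoop_eq (l : List (Char × Char)) (d : Int) (hd : 0 ≤ d) :
    pvDifferLoop l d = decide (d + (l.countP (fun p => p.1 != p.2) : Int) = 1) := by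
  induction l generalizing d with
  | nil => simp [pvDifferLoop, Bool.beq_eq_decide_eq]
  | cons p rest ih =>
    obtain ⟨x, y⟩ := p
    by_cases hxy : x = y
    · simp [pvDifferLoop, hxy, ih d hd, List.countP_cons]
    · simp only [pvDifferLoop, ne_eq, hxy, not_false_eq_true, if_true]
      by_cases hd1 : d + 1 > 1
      · have hne : d + ((((x, y) :: rest).countP (fun p => p.1 != p.2) : Nat) : Int) ≠ 1 := by
          have : ((x,y) :: rest).countP (fun p => p.1 != p.2) ≥ 1 := by
            simp [List.countP_cons, hxy]
          omega
        simp [hd1, hne]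
      · have hd0 : d = 0 := by omega
        subst hd0
        simp only [gt_iff_lt, hd1, if_false]
        rw [ih (0 + 1) (by norm_num)]
        apply decide_eq_decide.mpr
        have : ((x,y) :: rest).countP (fun p => p.1 != p.2) = rest.countP (fun p => p.1 != p.2) + 1 := by
          simp [List.countP_cons, hxy]
        rw [this]; push_cast; constructor <;> intro h <;> omega

theorem pvDifferByOne_eq (a b : String) :
    pvDifferByOne a b = decide (pvMism a.toList b.toList = 1) := by
  rw [pvDifferByOne, pvDifferLoop_eq _ 0 le_rfl]
  apply decide_eq_decide.mpr
  unfold pvMism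
  omega

theorem pvD_len_eq_pvQ (a b : String) :
    pvQ a b = if a.toList.length = b.toList.length then pvD a b else 0 := by
  unfold pvQ pvD
  rw [pvDifferByOne_eq]
  by_cases h : a.toList.length = b.toList.length <;> by_cases h2 : pvMism a.toList b.toList = 1 <;>
    simp [h, h2]

theorem pvPairLoop_eq (g : List String) (c : Int) :
    (PySem.List.pyRange 0 (g.length : Int) 1).foldl (fun count i =>
      (PySem.List.pyRange (i + 1) (g.length : Int) 1).foldl (fun count j =>
        if pvDifferByOne (PySem.List.pyGetD g i "") (PySem.List.pyGetD g j "") then count + 1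
        else count) count) c = c + pvPS pvD g := by
  have hstep : ∀ (c : Int) (i : Int), i ∈ PySem.List.pyRange 0 (g.length : Int) 1 →
      (PySem.List.pyRange (i + 1) (g.length : Int) 1).foldl (fun count j =>
        if pvDifferByOne (PySem.List.pyGetD g i "") (PySem.List.pyGetD g j "") then count + 1
        else count) c
      = c + ((g.drop (i + 1).toNat).countP (fun t => pvDifferByOne (PySem.List.pyGetD g i "") t) : Int) := by
    intro c i hi
    have hi0 : 0 ≤ i := by
      have := (PySem.List.mem_pyRange_one).mp hi; omega
    rw [PySem.List.foldl_pyRange_pyGetD' g ""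
      (f := fun count t => if pvDifferByOne (PySem.List.pyGetD g i "") t then count + 1 else count) c (by omega)]
    rw [PySem.List.foldl_if_add_one]
  rw [PySem.List.foldl_congr_mem (PySem.List.pyRange 0 (g.length : Int) 1) _
    (fun (c : Int) (i : Int) =>
      c + ((g.drop (i + 1).toNat).countP (fun t => pvDifferByOne (PySem.List.pyGetD g i "") t) : Int))
    c (fun acc x hx => hstep acc x hx)]
  rw [PySem.List.foldl_add]
  congr 1
  rw [PySem.List.pyRange_one]
  simp only [List.map_map, sub_zero, Int.toNat_natCast]
  rw [← pvRangeSum_eq_pvPS g]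
  apply congrArg
  apply List.map_congr_left
  intro k hk
  have h1 : (0 : Int) + (k : Int) = ((k : Nat) : Int) := by omega
  simp only [Function.comp, h1, PySem.List.pyGetD_natCast]
  have h2 : (((k : Nat) : Int) + 1).toNat = k + 1 := by omega
  rw [h2]

theorem pvGroups_items (l : List String) :
    (pvGroups l).items = (PySem.Set.ofList (l.map PySem.Str.len)).map
      (fun k => (k, l.filter (fun s => PySem.Str.len s == k))) := by
  induction l using List.reverseRecOn with
  | nil => rfl
  | append_singleton l s ih =>
    have hstep : pvGroups (l ++ [s]) =
        (let G := pvGroups l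
         let k : Int := PySem.Str.len s
         let G1 := if G.contains k then G else G.insert k []
         G1.insert k (G1.getD k [] ++ [s])) := by
      unfold pvGroups
      rw [List.foldl_append]
      rfl
    have hkeys : (pvGroups l).keys = PySem.Set.ofList (l.map PySem.Str.len) := by
      show (pvGroups l).items.map (·.1) = _
      rw [ih, List.map_map]
      rw [show ((fun (x : Int × List String) => x.1) ∘ fun k => (k, l.filter (fun s => PySem.Str.len s == k))) = id from rfl, List.map_id]
    have hnd : (pvGroups l).keys.Nodup := by
      rw [hkeys]; exact PySem.Set.nodup_ofList _
    have hcontains : (pvGroups l).contains (PySem.Str.len s) = decide (PySem.Str.len s ∈ l.map PySem.Str.len) := by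
      rw [PySem.Dict.contains_eq_decide_mem_keys, hkeys]
      simp [PySem.Set.mem_ofList]
    by_cases hmem : PySem.Str.len s ∈ l.map PySem.Str.len
    · -- key already present
      have hc : (pvGroups l).contains (PySem.Str.len s) = true := by rw [hcontains]; exact decide_eq_true hmem
      have hset : PySem.Str.len s ∈ PySem.Set.ofList (l.map PySem.Str.len) := by
        rw [PySem.Set.mem_ofList]; exact hmem
      have hgetD : (pvGroups l).getD (PySem.Str.len s) [] =
          l.filter (fun t => PySem.Str.len t == PySem.Str.len s) := by
        apply PySem.Dict.getD_of_mem_items _ _ hnd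
        rw [ih]
        exact List.mem_map_of_mem hset
      rw [hstep]
      simp only [hc, if_true]
      rw [PySem.Dict.items_insert_of_contains _ _ hc, ih, hgetD]
      have hset2 : PySem.Set.ofList ((l ++ [s]).map PySem.Str.len) = PySem.Set.ofList (l.map PySem.Str.len) := by
        rw [List.map_append, List.map_singleton, PySem.Set.ofList_eq_foldl, List.foldl_append,
          ← PySem.Set.ofList_eq_foldl]
        exact PySem.Set.add_of_mem hset
      rw [hset2, List.map_map]
      apply List.map_congr_left
      intro k hk
      by_cases hks : k = PySem.Str.len s
      · subst hks
        simp only [Function.comp_apply, beq_self_eq_true, if_true]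
        rw [List.filter_append]
        simp
      · have : (k == PySem.Str.len s) = false := beq_eq_false_iff_ne.mpr hks
        simp only [Function.comp_apply, this, Bool.false_eq_true, if_false]
        rw [List.filter_append]
        have hf : (PySem.Str.len s == k) = false := beq_eq_false_iff_ne.mpr (fun h => hks h.symm)
        rw [List.filter_singleton, hf]
        simp
    · -- fresh key
      have hc : (pvGroups l).contains (PySem.Str.len s) = false := by rw [hcontains]; exact decide_eq_false hmem
      have hnotset : PySem.Str.len s ∉ PySem.Set.ofList (l.map PySem.Str.len) := by
        rw [PySem.Set.mem_ofList]; exact hmem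
      rw [hstep]
      simp only [hc, Bool.false_eq_true, if_false]
      rw [PySem.Dict.getD_insert_self, PySem.Dict.insert_insert_self, List.nil_append]
      have hc2 : (pvGroups l).contains (PySem.Str.len s) = false := hc
      rw [PySem.Dict.items_insert_of_not_contains _ _ hc2, ih]
      have hset2 : PySem.Set.ofList ((l ++ [s]).map PySem.Str.len) =
          PySem.Set.ofList (l.map PySem.Str.len) ++ [PySem.Str.len s] := by
        rw [List.map_append, List.map_singleton, PySem.Set.ofList_eq_foldl, List.foldl_append,
          ← PySem.Set.ofList_eq_foldl]
        exact PySem.Set.add_of_not_mem hnotset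
      rw [hset2, List.map_append]
      congr 1
      · apply List.map_congr_left
        intro k hk
        have hks : k ≠ PySem.Str.len s := by
          intro h; subst h; exact hnotset hk
        rw [List.filter_append]
        have hf : (PySem.Str.len s == k) = false := beq_eq_false_iff_ne.mpr (fun h => hks h.symm)
        rw [List.filter_singleton, hf]
        simp
      · simp only [List.map_singleton]
        rw [List.filter_append]
        have h1 : l.filter (fun t => PySem.Str.len t == PySem.Str.len s) = [] := by
          rw [List.filter_eq_nil_iff]
          intro t ht
          simp only [beq_iff_eq]
          intro h
          exact hmem (h ▸ List.mem_map_of_mem ht)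
        have h2 : [s].filter (fun t => PySem.Str.len t == PySem.Str.len s) = [s] := by simp
        rw [h1, h2]
        rfl

theorem pvFiber_sum (l : List String) (ks : List Int) (hnd : ks.Nodup)
    (hmem : ∀ s ∈ l, PySem.Str.len s ∈ ks) :
    (ks.map (fun k => pvPS pvD (l.filter (fun s => PySem.Str.len s == k)))).sum = pvPS pvQ l := by
  induction l with
  | nil => simp [pvPS]
  | cons x t ih =>
    have hxk : PySem.Str.len x ∈ ks := hmem x List.mem_cons_self
    have hfilter : ∀ k : Int, (x :: t).filter (fun s => PySem.Str.len s == k) =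
        if PySem.Str.len x = k then x :: t.filter (fun s => PySem.Str.len s == k)
        else t.filter (fun s => PySem.Str.len s == k) := by
      intro k
      by_cases h : PySem.Str.len x = k
      · rw [List.filter_cons, if_pos (by simpa using h), if_pos h]
      · rw [List.filter_cons, if_neg (by simpa using h), if_neg h]
    have hagree : ∀ k ∈ ks, k ≠ PySem.Str.len x →
        pvPS pvD ((x :: t).filter (fun s => PySem.Str.len s == k)) =
        pvPS pvD (t.filter (fun s => PySem.Str.len s == k)) := by
      intro k _ hk
      rw [hfilter k, if_neg (fun h => hk h.symm)]
    rw [pvSum_map_update ks _ _ (PySem.Str.len x) hnd hxk hagree]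
    rw [ih (fun s hs => hmem s (List.mem_cons_of_mem _ hs))]
    have hx' : pvPS pvD ((x :: t).filter (fun s => PySem.Str.len s == PySem.Str.len x)) =
        ((t.filter (fun s => PySem.Str.len s == PySem.Str.len x)).map (pvD x)).sum +
          pvPS pvD (t.filter (fun s => PySem.Str.len s == PySem.Str.len x)) := by
      rw [hfilter _, if_pos rfl]; rfl
    simp only [pvPS]
    rw [hx']
    have : ((t.filter (fun s => PySem.Str.len s == PySem.Str.len x)).map (pvD x)).sum
        = (t.map (pvQ x)).sum := by
      rw [pvSum_map_filter]
      apply congrArg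
      apply List.map_congr_left
      intro y _
      rw [pvD_len_eq_pvQ]
      by_cases h : x.toList.length = y.toList.length
      · have : (PySem.Str.len y == PySem.Str.len x) = true := by
          simp [PySem.Str.len_eq, h]
        rw [this, if_pos h]; simp
      · have : (PySem.Str.len y == PySem.Str.len x) = false := by
          apply beq_eq_false_iff_ne.mpr
          rw [PySem.Str.len_eq, PySem.Str.len_eq]
          intro hc
          exact h (by exact_mod_cast hc.symm)
        rw [this, if_neg h]; simp
    rw [this]; ring

theorem portA_eq (codes : List Int) :
    count_one_digit_diff_pairs codes = pvPS pvQ (codes.map (fun c => PySem.Int.toStr c)) := by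
  show (pvGroups (codes.map (fun c => PySem.Int.toStr c))).values.foldl _ 0 = _
  set σ := codes.map (fun c => PySem.Int.toStr c) with hσ
  have hvals : (pvGroups σ).values = (PySem.Set.ofList (σ.map PySem.Str.len)).map
      (fun k => σ.filter (fun s => PySem.Str.len s == k)) := by
    show (pvGroups σ).items.map (·.2) = _
    rw [pvGroups_items, List.map_map]
    rfl
  rw [hvals]
  rw [PySem.List.foldl_congr_mem _ _ (fun (c : Int) (g : List String) => c + pvPS pvD g) 0
    (fun acc g _ => pvPairLoop_eq g acc)]
  rw [PySem.List.foldl_add, List.map_map]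
  rw [zero_add]
  exact pvFiber_sum σ _ (PySem.Set.nodup_ofList _)
    (fun s hs => (PySem.Set.mem_ofList _ _).mpr (List.mem_map_of_mem hs))

-- ---------- B-side ----------

abbrev pvCond (A B : List Char) (k : Nat) : Prop :=
  k < B.length ∧ A.take k = B.take k ∧ A.drop (k + 1) = B.drop (k + 1)

theorem pvC2_succ (n : Nat) : pvC2 (n + 1) = pvC2 n + n := by
  have h : (n + 1) * n / 2 = n * (n - 1) / 2 + n := by
    rcases n with _ | m
    · rfl
    · have h1 : (m + 2) * (m + 1) = (m + 1) * m + (m + 1) * 2 := by ring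
      have h2 : (m + 1) * ((m + 1) - 1) = (m + 1) * m := by simp
      rw [h1, Nat.add_mul_div_right _ _ (by norm_num), h2]
  unfold pvC2
  have h3 : (n + 1) - 1 = n := rfl
  rw [h3, h]
  push_cast
  ring

theorem pvSum_ind_w {α : Type} [BEq α] [LawfulBEq α] (xs : List α) (x : α) (w : α → Int) :
    (xs.map (fun a => if a == x then w a else 0)).sum = w x * (xs.count x : Int) := by
  induction xs with
  | nil => simp
  | cons y t ih =>
    by_cases h : y = x
    · subst h
      simp only [List.map_cons, List.sum_cons, beq_self_eq_true, if_pos rfl, ih, List.count_cons_self]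
      push_cast; ring
    · simp only [List.map_cons, List.sum_cons, beq_eq_false_iff_ne.mpr h, ih,
        List.count_cons_of_ne h, Bool.false_eq_true, if_false]
      ring

theorem pvOfList_append_singleton {α : Type} [BEq α] (xs : List α) (x : α) :
    PySem.Set.ofList (xs ++ [x]) = PySem.Set.add (PySem.Set.ofList xs) x := by
  rw [PySem.Set.ofList_eq_foldl, List.foldl_append, ← PySem.Set.ofList_eq_foldl]
  rfl

theorem pvCounter_sum {α : Type} [BEq α] [LawfulBEq α] (w : α → Int) (xs : List α) :
    ((PySem.Set.ofList xs).map (fun k => w k * pvC2 (xs.count k))).sum =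
      pvPS (fun a b => if a == b then w a else 0) xs := by
  induction xs using List.reverseRecOn with
  | nil => rfl
  | append_singleton xs x ih =>
    rw [pvPS_append_singleton, pvSum_ind_w, pvOfList_append_singleton]
    by_cases hx : x ∈ PySem.Set.ofList xs
    · rw [PySem.Set.add_of_mem hx]
      have hagree : ∀ k ∈ PySem.Set.ofList xs, k ≠ x →
          w k * pvC2 ((xs ++ [x]).count k) = w k * pvC2 (xs.count k) := by
        intro k _ hk
        rw [List.count_append, List.count_singleton]
        simp [beq_eq_false_iff_ne.mpr (fun h : x = k => hk h.symm)]
      rw [pvSum_map_update _ _ _ x (PySem.Set.nodup_ofList _) hx hagree, ih]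
      have hcx : (xs ++ [x]).count x = xs.count x + 1 := by
        rw [List.count_append]; simp
      rw [hcx, pvC2_succ]
      push_cast
      ring
    · have hxx : x ∉ xs := fun h => hx ((PySem.Set.mem_ofList _ _).mpr h)
      have h0 : xs.count x = 0 := List.count_eq_zero.mpr hxx
      rw [PySem.Set.add_of_not_mem hx, List.map_append, List.sum_append]
      have hagree : ∀ k ∈ PySem.Set.ofList xs,
          w k * pvC2 ((xs ++ [x]).count k) = w k * pvC2 (xs.count k) := by
        intro k hk
        have hkx : x ≠ k := fun h => hxx (by
          subst h; exact (PySem.Set.mem_ofList _ _).mp hk)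
        rw [List.count_append, List.count_singleton]
        simp [beq_eq_false_iff_ne.mpr hkx]
      rw [List.map_congr_left hagree, ih]
      have hcx : (xs ++ [x]).count x = 1 := by
        rw [List.count_append, h0]; simp
      simp only [List.map_singleton, List.sum_singleton, hcx, h0]
      have : pvC2 1 = 0 := rfl
      rw [this]
      simp

theorem pvMism_zero_iff (A B : List Char) (h : A.length = B.length) :
    pvMism A B = 0 ↔ A = B := by
  induction A generalizing B with
  | nil => cases B with
    | nil => simp [pvMism]
    | cons y B => simp at h
  | cons x A ih =>
    cases B with
    | nil => simp at h
    | cons y B =>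
      have h' : A.length = B.length := by simpa using h
      unfold pvMism
      rw [List.zip_cons_cons, List.countP_cons]
      by_cases hxy : x = y
      · simp [hxy, ← ih B h', pvMism]
      · have : ((x, y).1 != (x, y).2) = true := by simpa using hxy
        simp [this, hxy]

theorem pvM_of_len_ne (A B : List Char) (h : A.length ≠ B.length) : pvM A B = 0 := by
  induction A generalizing B with
  | nil => rfl
  | cons x A ih =>
    cases B with
    | nil => rfl
    | cons y B =>
      have h' : A.length ≠ B.length := by simpa using h
      have hAB : A ≠ B := fun he => h' (he ▸ rfl)
      simp [pvM, hAB, ih B h']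

theorem pvM_of_len_eq (A B : List Char) (h : A.length = B.length) :
    pvM A B = (if A = B then (A.length : Int) else 0) + (if pvMism A B = 1 then 1 else 0) := by
  induction A generalizing B with
  | nil =>
    cases B with
    | nil => simp [pvM, pvMism]
    | cons y B => simp at h
  | cons x A ih =>
    cases B with
    | nil => simp at h
    | cons y B =>
      have h' : A.length = B.length := by simpa using h
      have hm : pvMism (x :: A) (y :: B) = (if x = y then 0 else 1) + pvMism A B := by
        unfold pvMism
        rw [List.zip_cons_cons, List.countP_cons]
        by_cases hxy : x = y <;> simp [hxy]
        · omega
      by_cases hxy : x = y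
      · subst hxy
        rw [show pvM (x :: A) (x :: B) = (if A = B then 1 else 0) + pvM A B from by simp [pvM]]
        rw [ih B h', hm]
        by_cases hAB : A = B
        · subst hAB
          have : pvMism A A = 0 := (pvMism_zero_iff A A rfl).mpr rfl
          simp [this]
          ring
        · have hAB2 : (x :: A) ≠ (x :: B) := by simp [hAB]
          simp [hAB, hAB2]
      · have hAB2 : (x :: A) ≠ (y :: B) := by simp [hxy]
        rw [show pvM (x :: A) (y :: B) = (if A = B then 1 else 0) + 0 from by simp [pvM, hxy]]
        rw [hm, if_neg hxy]
        have : (pvMism A B = 0) ↔ A = B := pvMism_zero_iff A B h'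
        by_cases hAB : A = B
        · subst hAB
          simp [hAB2, hxy, (pvMism_zero_iff A A rfl).mpr rfl]
        · have : pvMism A B ≠ 0 := fun hz => hAB (this.mp hz)
          simp [hAB2, hAB]
          omega

theorem pvSum_factor {β : Type} (l : List β) (P : Prop) [Decidable P] (Q : β → Prop) [DecidablePred Q] :
    (l.map (fun k => if P ∧ Q k then (1 : Int) else 0)).sum =
      if P then (l.map (fun k => if Q k then (1 : Int) else 0)).sum else 0 := by
  by_cases hP : P <;> simp [hP]

theorem pvM_eq_sum (A B : List Char) :
    ((List.range A.length).map (fun k => if pvCond A B k then (1 : Int) else 0)).sum = pvM A B := by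
  induction A generalizing B with
  | nil => simp [pvM]
  | cons x A ih =>
    cases B with
    | nil =>
      have : ∀ k ∈ List.range (x :: A).length, (if pvCond (x :: A) [] k then (1:Int) else 0) = 0 := by
        intro k _
        simp [pvCond]
      rw [List.map_congr_left this]
      simp [pvM]
    | cons y B =>
      have hr : List.range (x :: A).length = 0 :: (List.range A.length).map Nat.succ := by
        rw [List.length_cons, List.range_succ_eq_map]
      rw [hr, List.map_cons, List.map_map, List.sum_cons]
      have h0 : (if pvCond (x :: A) (y :: B) 0 then (1:Int) else 0) = if A = B then 1 else 0 := by
        apply if_congr _ rfl rfl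
        simp [pvCond]
      have hsh : ∀ k ∈ List.range A.length,
          ((fun k => if pvCond (x :: A) (y :: B) k then (1:Int) else 0) ∘ Nat.succ) k
          = (fun k => if x = y ∧ pvCond A B k then (1:Int) else 0) k := by
        intro k _
        simp only [Function.comp_apply]
        apply if_congr _ rfl rfl
        unfold pvCond
        constructor
        · rintro ⟨h1, h2, h3⟩
          rw [List.take_succ_cons, List.take_succ_cons] at h2
          have hxy : x = y := (List.cons.injEq _ _ _ _).mp h2 |>.1
          exact ⟨hxy, by simp only [List.length_cons] at h1; omega, (List.cons.injEq _ _ _ _).mp h2 |>.2, h3⟩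
        · rintro ⟨hxy, h1, h2, h3⟩
          exact ⟨by simp only [List.length_cons]; omega, by rw [List.take_succ_cons, List.take_succ_cons, hxy, h2], h3⟩
      rw [h0, List.map_congr_left hsh, pvSum_factor, ih B]
      rfl

theorem pvSlice_to_toList (s : String) (k : Nat) :
    (PySem.Str.slice s none (some (k : Int))).toList = s.toList.take k := by
  rw [PySem.Str.toList_slice]
  show PySem.List.slice s.toList none (some (k : Int)) = _
  rw [PySem.List.slice_to _ (by positivity)]
  simp

theorem pvSlice_from_toList (s : String) (k : Nat) :
    (PySem.Str.slice s (some ((k : Int) + 1)) none).toList = s.toList.drop (k + 1) := by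
  rw [PySem.Str.toList_slice]
  show PySem.List.slice s.toList (some ((k : Int) + 1)) none = _
  rw [PySem.List.slice_from _ (by positivity)]
  have h : ((k : Int) + 1).toNat = k + 1 := by omega
  rw [h]

theorem pvMem_pvKeys (a b : String) (k : Nat) :
    ((k : Int), PySem.Str.slice a none (some (k : Int)),
      PySem.Str.slice a (some ((k : Int) + 1)) none) ∈ pvKeys b
    ↔ pvCond a.toList b.toList k := by
  unfold pvKeys
  rw [List.mem_map]
  constructor
  · rintro ⟨i, hi, heq⟩
    rw [Prod.ext_iff] at heq
    have h1 : i = (k : Int) := heq.1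
    subst h1
    rw [Prod.ext_iff] at heq
    have h2 := congrArg String.toList heq.2.1
    have h3 := congrArg String.toList heq.2.2
    rw [pvSlice_to_toList, pvSlice_to_toList] at h2
    rw [pvSlice_from_toList, pvSlice_from_toList] at h3
    have hk : (k : Int) < PySem.Str.len b := ((PySem.List.mem_pyRange_one).mp hi).2
    rw [PySem.Str.len_eq] at hk
    exact ⟨by exact_mod_cast hk, h2.symm, h3.symm⟩
  · rintro ⟨hk, ht, hd⟩
    refine ⟨(k : Int), ?_, ?_⟩
    · rw [PySem.List.mem_pyRange_one, PySem.Str.len_eq]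
      constructor
      · positivity
      · exact_mod_cast hk
    · rw [Prod.ext_iff]
      refine ⟨rfl, ?_⟩
      rw [Prod.ext_iff]
      constructor
      · apply String.toList_inj.mp
        rw [pvSlice_to_toList, pvSlice_to_toList]
        exact ht.symm
      · apply String.toList_inj.mp
        rw [pvSlice_from_toList, pvSlice_from_toList]
        exact hd.symm

theorem pvKeys_nodup (s : String) : (pvKeys s).Nodup := by
  apply List.Nodup.map_on _ (PySem.List.nodup_pyRange_one 0 (PySem.Str.len s))
  intro i _ j _ h
  exact (Prod.mk.injEq _ _ _ _).mp h |>.1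

theorem pvKeys_eq_range (s : String) :
    pvKeys s = (List.range s.toList.length).map (fun (k : Nat) =>
      ((k : Int), PySem.Str.slice s none (some (k : Int)),
        PySem.Str.slice s (some ((k : Int) + 1)) none)) := by
  unfold pvKeys
  rw [PySem.List.pyRange_one, List.map_map]
  have hlen : ((PySem.Str.len s : Int) - 0).toNat = s.toList.length := by
    rw [PySem.Str.len_eq]; omega
  rw [hlen]
  apply List.map_congr_left
  intro k _
  simp only [Function.comp_apply, zero_add]

theorem pvSum_ind_mem {β : Type} [BEq β] [LawfulBEq β] [DecidableEq β] (l : List β) (x : β)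
    (h : l.Nodup) : (l.map (fun y => if x == y then (1 : Int) else 0)).sum =
      if x ∈ l then 1 else 0 := by
  induction l with
  | nil => simp
  | cons z t ih =>
    by_cases hz : x = z
    · subst hz
      have hnx : x ∉ t := (List.nodup_cons.mp h).1
      have : ∀ y ∈ t, (if x == y then (1:Int) else 0) = 0 := by
        intro y hy
        have : x ≠ y := fun he => hnx (he ▸ hy)
        simp [beq_eq_false_iff_ne.mpr this]
      simp only [List.map_cons, List.sum_cons, beq_self_eq_true, if_pos rfl]
      rw [List.map_congr_left this]
      simp
    · simp only [List.map_cons, List.sum_cons, beq_eq_false_iff_ne.mpr hz,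
        Bool.false_eq_true, if_false, ih (List.nodup_cons.mp h).2, zero_add]
      have : (x ∈ z :: t) ↔ (x ∈ t) := by
        simp [List.mem_cons, hz]
      rw [if_congr this rfl rfl]

theorem pvCross_eq_pvM (a b : String) :
    ((pvKeys a).map (fun x => ((pvKeys b).map
      (fun y => if x == y then (1 : Int) else 0)).sum)).sum = pvM a.toList b.toList := by
  have h1 : ∀ x ∈ pvKeys a, ((pvKeys b).map (fun y => if x == y then (1 : Int) else 0)).sum
      = if x ∈ pvKeys b then 1 else 0 := fun x _ => pvSum_ind_mem _ x (pvKeys_nodup b)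
  rw [List.map_congr_left h1]
  conv_lhs => rw [pvKeys_eq_range a]
  rw [List.map_map, ← pvM_eq_sum a.toList b.toList]
  apply congrArg
  apply List.map_congr_left
  intro k hk
  simp only [Function.comp_apply]
  rw [if_congr (pvMem_pvKeys a b k) rfl rfl]







theorem pvC2_floordiv (c : Nat) :
    PySem.Int.floordiv ((c : Int) * ((c : Int) - 1)) 2 = pvC2 c := by
  rcases c with _ | n
  · rw [show ((0:Nat):Int) * (((0:Nat):Int) - 1) = 0 by norm_num,
      PySem.Int.floordiv_eq_ediv_of_pos (by norm_num)]
    rfl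
  · have h1 : ((n+1:Nat) : Int) * (((n+1:Nat) : Int) - 1) = (((n+1)*n : Nat) : Int) := by
      push_cast; ring
    rw [h1, PySem.Int.floordiv_eq_ediv_of_pos (by norm_num)]
    rw [show ((2:Int)) = ((2:Nat):Int) from rfl, ← Int.natCast_div]
    unfold pvC2
    simp

theorem pvSum_map_neg {α : Type} (l : List α) (f : α → Int) :
    (l.map (fun x => -(f x))).sum = -((l.map f).sum) := by
  induction l with
  | nil => simp
  | cons x t ih => simp [ih]; ring

theorem pvFinal (a b : String) :
    pvM a.toList b.toList - (if a == b then PySem.Str.len a else 0) = pvQ a b := by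
  by_cases hlen : a.toList.length = b.toList.length
  · rw [pvM_of_len_eq _ _ hlen]
    by_cases hab : a = b
    · subst hab
      have hm : pvMism a.toList a.toList = 0 := (pvMism_zero_iff _ _ rfl).mpr rfl
      unfold pvQ
      simp [hm, PySem.Str.len_eq]
    · have htl : a.toList ≠ b.toList := fun h => hab (String.toList_inj.mp h)
      unfold pvQ
      simp only [beq_eq_false_iff_ne.mpr hab, Bool.false_eq_true, if_false, if_neg htl,
        sub_zero, zero_add]
      simp [hlen]
  · have hab : a ≠ b := fun h => hlen (by rw [h])
    rw [pvM_of_len_ne _ _ hlen]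
    unfold pvQ
    simp only [beq_eq_false_iff_ne.mpr hab, Bool.false_eq_true, if_false, sub_zero]
    rw [if_neg (fun hc => hlen hc.1)]

set_option maxHeartbeats 2000000 in
theorem portB_eq (codes : List Int) :
    count_one_digit_diff_pairs_alt codes = pvPS pvQ (codes.map (fun c => PySem.Int.toStr c)) := by
  unfold count_one_digit_diff_pairs_alt
  simp only []
  rw [PySem.List.foldl_prod_mk
    (f := fun (m : PySem.Dict (Int × String × String) Int) (c : Int) =>
      (PySem.List.pyRange 0 (PySem.Str.len (PySem.Int.toStr c)) 1).foldl
        (fun masked i =>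
          masked.insert (i, PySem.Str.slice (PySem.Int.toStr c) none (some i),
              PySem.Str.slice (PySem.Int.toStr c) (some (i + 1)) none)
            (masked.getD (i, PySem.Str.slice (PySem.Int.toStr c) none (some i),
              PySem.Str.slice (PySem.Int.toStr c) (some (i + 1)) none) 0 + 1)) m)
    (g := fun (d : PySem.Dict String Int) (c : Int) =>
      d.insert (PySem.Int.toStr c) (d.getD (PySem.Int.toStr c) 0 + 1))]
  have hstepm : ∀ (m : PySem.Dict (Int × String × String) Int) (c : Int),
      (PySem.List.pyRange 0 (PySem.Str.len (PySem.Int.toStr c)) 1).foldl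
        (fun masked i => masked.insert (i, PySem.Str.slice (PySem.Int.toStr c) none (some i),
            PySem.Str.slice (PySem.Int.toStr c) (some (i + 1)) none)
          (masked.getD (i, PySem.Str.slice (PySem.Int.toStr c) none (some i),
            PySem.Str.slice (PySem.Int.toStr c) (some (i + 1)) none) 0 + 1)) m
      = (pvKeys (PySem.Int.toStr c)).foldl (fun d x => d.insert x (d.getD x 0 + 1)) m := by
    intro m c
    unfold pvKeys
    rw [List.foldl_map]
  have hmask : codes.foldl (fun m c =>
      (PySem.List.pyRange 0 (PySem.Str.len (PySem.Int.toStr c)) 1).foldl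
        (fun masked i => masked.insert (i, PySem.Str.slice (PySem.Int.toStr c) none (some i),
            PySem.Str.slice (PySem.Int.toStr c) (some (i + 1)) none)
          (masked.getD (i, PySem.Str.slice (PySem.Int.toStr c) none (some i),
            PySem.Str.slice (PySem.Int.toStr c) (some (i + 1)) none) 0 + 1)) m) PySem.Dict.empty
      = PySem.Dict.counter ((codes.map (fun c => PySem.Int.toStr c)).flatMap pvKeys) := by
    rw [PySem.List.foldl_congr_mem codes _
      (fun m c => (pvKeys (PySem.Int.toStr c)).foldl (fun d x => d.insert x (d.getD x 0 + 1)) m)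
      PySem.Dict.empty (fun acc x _ => hstepm acc x)]
    rw [← PySem.Dict.foldl_insert_getD_add_one_eq_counter, List.foldl_flatMap, List.foldl_map]
  have hfull : codes.foldl (fun (d : PySem.Dict String Int) c =>
      d.insert (PySem.Int.toStr c) (d.getD (PySem.Int.toStr c) 0 + 1)) PySem.Dict.empty
      = PySem.Dict.counter (codes.map (fun c => PySem.Int.toStr c)) := by
    rw [← PySem.Dict.foldl_insert_getD_add_one_eq_counter, List.foldl_map]
  rw [hmask, hfull]
  dsimp only
  have hvals : (PySem.Dict.counter ((codes.map (fun c => PySem.Int.toStr c)).flatMap pvKeys)).values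
      = (PySem.Set.ofList ((codes.map (fun c => PySem.Int.toStr c)).flatMap pvKeys)).map
        (fun k => ((((codes.map (fun c => PySem.Int.toStr c)).flatMap pvKeys).count k : Nat) : Int)) := by
    show (PySem.Dict.counter _).items.map (·.2) = _
    rw [PySem.Dict.items_counter, List.map_map]
    rfl
  have htotal1 : (PySem.Dict.counter ((codes.map (fun c => PySem.Int.toStr c)).flatMap pvKeys)).values.foldl
      (fun total v => total + PySem.Int.floordiv (v * (v - 1)) 2) 0
      = pvPS (fun a b => if a == b then (1 : Int) else 0)
          ((codes.map (fun c => PySem.Int.toStr c)).flatMap pvKeys) := by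
    rw [hvals, PySem.List.foldl_add, List.map_map, zero_add]
    have hpt : ∀ k ∈ PySem.Set.ofList ((codes.map (fun c => PySem.Int.toStr c)).flatMap pvKeys),
        ((fun v => PySem.Int.floordiv (v * (v - 1)) 2) ∘
          (fun k => ((((codes.map (fun c => PySem.Int.toStr c)).flatMap pvKeys).count k : Nat) : Int))) k
        = (fun k => (1 : Int) * pvC2 (((codes.map (fun c => PySem.Int.toStr c)).flatMap pvKeys).count k)) k := by
      intro k _
      simp only [Function.comp_apply, one_mul]
      exact pvC2_floordiv _
    rw [List.map_congr_left hpt, pvCounter_sum (fun _ => (1 : Int))]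
  rw [htotal1]
  rw [PySem.Dict.items_counter, List.foldl_map]
  rw [PySem.List.foldl_congr_mem _ _
    (fun (t : Int) (k : String) =>
      t + (-(PySem.Str.len k * pvC2 ((codes.map (fun c => PySem.Int.toStr c)).count k)))) _
    (by
      intro acc k _
      dsimp only
      rw [pvC2_floordiv, sub_eq_add_neg])]
  rw [PySem.List.foldl_add, pvSum_map_neg, pvCounter_sum PySem.Str.len]
  rw [pvPS_flatMap]
  have hzero : ∀ s ∈ codes.map (fun c => PySem.Int.toStr c),
      (fun s => pvPS (fun a b => if a == b then (1 : Int) else 0) (pvKeys s)) s = (fun _ => (0 : Int)) s := by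
    intro s _
    exact pvPS_eq_ind_zero_of_nodup _ (pvKeys_nodup s)
  rw [List.map_congr_left hzero]
  rw [pvPS_congr (codes.map (fun c => PySem.Int.toStr c)) (fun a b => pvCross_eq_pvM a b)]
  simp only [List.map_const', List.sum_replicate, smul_zero, zero_add]
  rw [← sub_eq_add_neg, ← pvPS_sub]
  exact pvPS_congr _ (fun a b => pvFinal a b)

-- ===== VERDICT (by name: the statement is the Claim_ definition above) =====
theorem count_one_digit_diff_pairs_spec : Claim_equal_count_one_digit_diff_pairs := by
  intro codes _
  show count_one_digit_diff_pairs codes = count_one_digit_diff_pairs_alt codes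
  rw [portA_eq, portB_eq]
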